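-- pv_equiv track=rewrite | github.com/MisakaMikotoStudio/ai_task | apiserver/utils/tencent_dns_utils.py | _match_zone
-- ===== SOURCE A (Python) =====
-- def _match_zone(fqdn: str, managed_zones: list) -> tuple:
--     """把 fqdn 拆成 DNSPod 需要的 (domain, subdomain)，未命中 zone 返回 (None, None)
--
--     - fqdn == zone 时，subdomain = '@'
--     - 按「最长后缀」命中，多 zone 情况下不会误匹配父域
--     """
--     fqdn = (fqdn or '').strip().lower().rstrip('.')
--     if not fqdn:
--         return None, None
--
--     best_zone = ''
--     for zone in managed_zones or []:
--         z = (zone or '').strip().lower().rstrip('.')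
--         if not z:
--             continue
--         if fqdn == z or fqdn.endswith('.' + z):
--             if len(z) > len(best_zone):
--                 best_zone = z
--
--     if not best_zone:
--         return None, None
--     if fqdn == best_zone:
--         return best_zone, '@'
--     return best_zone, fqdn[:-(len(best_zone) + 1)]
-- ===== SOURCE B (Python) =====
-- def _match_zone(fqdn: str, managed_zones: list) -> tuple:
--     """Normalize everything first, then try zones longest-first and return at the
--     first hit (the longest match is unique, so no running best is needed)."""
--     fqdn = (fqdn or '').strip().lower().rstrip('.')
--     if not fqdn:
--         return None, None
--
--     zones = [(zone or '').strip().lower().rstrip('.') for zone in managed_zones or []]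
--     for z in sorted((z for z in zones if z), key=len, reverse=True):
--         if fqdn == z:
--             return z, '@'
--         if fqdn.endswith('.' + z):
--             return z, fqdn[:-(len(z) + 1)]
--     return None, None
-- ===== Notes on version B (the rewrite author's own statement) =====
-- stated objective: alternative
-- what changed: A keeps a running longest-match accumulator over the raw zone list; B normalizes all zones once, sorts the non-empty ones by length descending, and returns at the first zone that matches, which is necessarily the longest match.
import Mathlib
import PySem

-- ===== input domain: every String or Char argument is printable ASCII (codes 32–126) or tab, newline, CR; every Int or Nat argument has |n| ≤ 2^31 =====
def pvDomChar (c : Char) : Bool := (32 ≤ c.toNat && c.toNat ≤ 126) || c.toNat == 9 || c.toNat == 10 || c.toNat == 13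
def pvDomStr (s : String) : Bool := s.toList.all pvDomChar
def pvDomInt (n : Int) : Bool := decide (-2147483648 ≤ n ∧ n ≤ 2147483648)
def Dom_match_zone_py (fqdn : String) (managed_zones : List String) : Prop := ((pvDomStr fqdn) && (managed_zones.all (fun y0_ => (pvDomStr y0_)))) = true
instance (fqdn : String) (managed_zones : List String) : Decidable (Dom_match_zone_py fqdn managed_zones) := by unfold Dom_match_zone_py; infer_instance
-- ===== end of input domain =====

-- B replaces A's running-best scan by: normalize all zones once, sort them by length
-- descending, and return at the first zone that matches (objective: alternative).

-- shared normalization helper: (s or '').strip().lower().rstrip('.').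
-- 'or' is the identity here ('' or '' == ''); .rstrip('.') is ported by hand as
-- reverse / dropWhile (== '.') / reverse, which removes exactly the trailing '.' characters.
def pvNorm (s : String) : List Char :=
  ((PySem.Chars.lower (PySem.Chars.strip s.toList)).reverse.dropWhile (fun c => c == '.')).reverse

-- ===== PORT A =====
-- A's match test: fqdn == z or fqdn.endswith('.' + z)
def pvMatch (f z : List Char) : Bool := (f == z) || PySem.Chars.endswith f ('.' :: z)

-- A's loop body: skip empty normalized zones, keep the strictly longer match
def pvStepA (f best : List Char) (zone : String) : List Char :=
  let z := pvNorm zone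
  if z = [] then best
  else if pvMatch f z then (if best.length < z.length then z else best) else best

def match_zone_py (fqdn : String) (managed_zones : List String) : Option String × Option String :=
  let f := pvNorm fqdn
  if f = [] then (none, none)
  else
    let best := managed_zones.foldl (pvStepA f) []
    if best = [] then (none, none)
    else if f = best then (some (String.ofList best), some "@")
    else (some (String.ofList best), some (String.ofList (PySem.Chars.slice f none (some (-((best.length : Int) + 1))))))

-- ===== PORT B =====
-- B's loop: walk the sorted zones, return at the first match (fqdn[:-(len(z)+1)] is the slice)
def pvFirstMatch (f : List Char) : List (List Char) → Option String × Option String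
  | [] => (none, none)
  | z :: rest =>
    if f = z then (some (String.ofList z), some "@")
    else if PySem.Chars.endswith f ('.' :: z) then
      (some (String.ofList z), some (String.ofList (PySem.Chars.slice f none (some (-((z.length : Int) + 1))))))
    else pvFirstMatch f rest

def match_zone_py_alt (fqdn : String) (managed_zones : List String) : Option String × Option String :=
  let f := pvNorm fqdn
  if f = [] then (none, none)
  else
    pvFirstMatch f
      (PySem.List.sorted ((managed_zones.map pvNorm).filter (fun z => z ≠ [])) (fun z => z.length) true)

-- ===== PRECONDITION & SPEC =====
def Spec_match_zone_py (fqdn : String) (managed_zones : List String) (out : Option String × Option String) : Prop := out = match_zone_py_alt fqdn managed_zones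
instance (fqdn : String) (managed_zones : List String) (out : Option String × Option String) : Decidable (Spec_match_zone_py fqdn managed_zones out) := by unfold Spec_match_zone_py; infer_instance

-- ===== CLAIM (what is proved, stated in full; the proofs are below) =====
def Claim_equal_match_zone_py : Prop := ∀ (fqdn : String) (managed_zones : List String), Dom_match_zone_py fqdn managed_zones → Spec_match_zone_py fqdn managed_zones (match_zone_py fqdn managed_zones)

-- ===== LEMMAS AND PROOFS =====

-- the common shape of both ports' answers for a nonempty matching zone
def pvAnswer (f z : List Char) : Option String × Option String :=
  if f = z then (some (String.ofList z), some "@")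
  else (some (String.ofList z), some (String.ofList (PySem.Chars.slice f none (some (-((z.length : Int) + 1))))))

-- two matching zones of equal length are the same zone
lemma pvMatch_eq_of_length (f z1 z2 : List Char) (h1 : pvMatch f z1 = true)
    (h2 : pvMatch f z2 = true) (hl : z1.length = z2.length) : z1 = z2 := by
  simp only [pvMatch, Bool.or_eq_true, beq_iff_eq, PySem.Chars.endswith_iff] at h1 h2
  rcases h1 with h1 | h1 <;> rcases h2 with h2 | h2
  · rw [← h1, ← h2]
  · subst h1; have := List.IsSuffix.length_le h2; simp at this; omega
  · subst h2; have := List.IsSuffix.length_le h1; simp at this; omega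
  · rcases List.suffix_or_suffix_of_suffix h1 h2 with h | h <;>
      have := List.IsSuffix.eq_of_length h (by simp [hl]) <;>
      simp only [List.cons.injEq] at this <;>
      first
        | exact this.2
        | exact this.2.symm

-- invariant of A's fold: the result is the initial value or a matching normalized zone,
-- and its length dominates the initial value and every matching nonempty normalized zone
lemma pvFoldA_spec (f : List Char) (zs : List String) (b : List Char) :
    (zs.foldl (pvStepA f) b = b ∨
      ((∃ zone ∈ zs, pvNorm zone = zs.foldl (pvStepA f) b) ∧
        pvMatch f (zs.foldl (pvStepA f) b) = true ∧ zs.foldl (pvStepA f) b ≠ [])) ∧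
    b.length ≤ (zs.foldl (pvStepA f) b).length ∧
    ∀ zone ∈ zs, pvNorm zone ≠ [] → pvMatch f (pvNorm zone) = true →
      (pvNorm zone).length ≤ (zs.foldl (pvStepA f) b).length := by
  induction zs generalizing b with
  | nil => simp
  | cons zone rest ih =>
    simp only [List.foldl_cons, List.mem_cons]
    obtain ⟨ih1, ih2, ih3⟩ := ih (pvStepA f b zone)
    have hmono : b.length ≤ (pvStepA f b zone).length := by
      simp only [pvStepA]; split_ifs <;> omega
    have hcase : pvStepA f b zone = b ∨
        (pvNorm zone = pvStepA f b zone ∧ pvMatch f (pvStepA f b zone) = true ∧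
          pvStepA f b zone ≠ []) := by
      simp only [pvStepA]; split_ifs with h1 h2 h3
      · exact Or.inl rfl
      · exact Or.inr ⟨rfl, h2, h1⟩
      · exact Or.inl rfl
      · exact Or.inl rfl
    have hzone : pvNorm zone ≠ [] → pvMatch f (pvNorm zone) = true →
        (pvNorm zone).length ≤ (pvStepA f b zone).length := by
      intro hne hm; simp only [pvStepA, if_neg hne, if_pos hm]; split_ifs <;> omega
    refine ⟨?_, le_trans hmono ih2, ?_⟩
    · rcases ih1 with h | h
      · rw [h]
        rcases hcase with hc | hc
        · exact Or.inl hc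
        · exact Or.inr ⟨⟨zone, Or.inl rfl, hc.1⟩, hc.2⟩
      · obtain ⟨⟨zn, hzn, he⟩, hm, hne⟩ := h
        exact Or.inr ⟨⟨zn, Or.inr hzn, he⟩, hm, hne⟩
    · rintro zn (rfl | hzn) hne hm
      · exact le_trans (hzone hne hm) ih2
      · exact ih3 zn hzn hne hm

-- B's loop is find? followed by the common answer
lemma pvFirstMatch_eq_find? (f : List Char) (S : List (List Char)) :
    pvFirstMatch f S = match S.find? (pvMatch f) with
      | none => (none, none)
      | some s => pvAnswer f s := by
  induction S with
  | nil => rfl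
  | cons z rest ih =>
    by_cases hz : f = z
    · simp [pvFirstMatch, List.find?, pvMatch, hz, pvAnswer]
    · by_cases he : PySem.Chars.endswith f ('.' :: z) = true
      · simp [pvFirstMatch, List.find?, pvMatch, hz, he, pvAnswer]
      · have hp : pvMatch f z = false := by simp [pvMatch, hz, he]
        rw [List.find?_cons_of_neg (by simp [hp])]
        simp [pvFirstMatch, hz, he, ih]

-- ===== VERDICT (by name: the statement is the Claim_ definition above) =====
theorem match_zone_py_spec : Claim_equal_match_zone_py := by
  intro fqdn zs _
  unfold Spec_match_zone_py match_zone_py match_zone_py_alt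
  by_cases hf : pvNorm fqdn = []
  · simp [hf]
  · simp only [hf, ite_false]
    set f := pvNorm fqdn with hfdef
    set r := zs.foldl (pvStepA f) [] with hr
    set L := (zs.map pvNorm).filter (fun z => z ≠ []) with hL
    set S := PySem.List.sorted L (fun z => z.length) true with hS
    obtain ⟨hA1, -, hA3⟩ := pvFoldA_spec f zs []
    rw [pvFirstMatch_eq_find?]
    have hmemL : ∀ z, z ∈ L ↔ (∃ zone ∈ zs, pvNorm zone = z) ∧ z ≠ [] := by
      intro z
      simp [hL, List.mem_filter, List.mem_map]
    have hmemS : ∀ z, z ∈ S ↔ z ∈ L := fun z => PySem.List.mem_sorted L (fun z => z.length) true z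
    by_cases hM : ∃ z ∈ L, pvMatch f z = true
    · obtain ⟨z0, hz0L, hz0m⟩ := hM
      have hrmax : ∀ z ∈ L, pvMatch f z = true → z.length ≤ r.length := by
        intro z hz hm
        obtain ⟨⟨zone, hzone, hnz⟩, hne⟩ := (hmemL z).mp hz
        rw [← hnz]
        exact hA3 zone hzone (hnz ▸ hne) (hnz ▸ hm)
      have hrM : pvMatch f r = true ∧ r ≠ [] ∧ r ∈ L := by
        rcases hA1 with h | ⟨⟨zone, hzone, hnz⟩, hm, hne⟩
        · exfalso
          have := hrmax z0 hz0L hz0m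
          rw [hr, h] at this
          simp at this
          exact ((hmemL z0).mp hz0L).2 this
        · exact ⟨hm, hne, (hmemL r).mpr ⟨⟨zone, hzone, hnz⟩, hne⟩⟩
      obtain ⟨s, hfind⟩ : ∃ s, S.find? (pvMatch f) = some s := by
        rw [← Option.isSome_iff_exists]
        exact List.find?_isSome.mpr ⟨z0, (hmemS z0).mpr hz0L, hz0m⟩
      have hps : pvMatch f s = true := List.find?_some hfind
      have hsL : s ∈ L := (hmemS s).mp (List.mem_of_find?_eq_some hfind)
      have hsmax_r : r.length ≤ s.length := by
        obtain ⟨-, l₁, l₂, hSeq, hl₁⟩ := List.find?_eq_some_iff_append.mp hfind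
        have hrS : r ∈ S := (hmemS r).mpr hrM.2.2
        rw [hSeq] at hrS
        rcases List.mem_append.mp hrS with h | h
        · exact absurd hrM.1 (by simpa using hl₁ r h)
        · rcases List.mem_cons.mp h with h | h
          · rw [h]
          · have hp := PySem.List.sorted_pairwise_rev (xs := L) (key := fun z => z.length)
            rw [← hS, hSeq] at hp
            exact List.rel_of_pairwise_cons (List.pairwise_append.mp hp).2.1 h
      have hrs : r = s :=
        pvMatch_eq_of_length f r s hrM.1 hps (le_antisymm hsmax_r (hrmax s hsL hps))
      rw [hfind, ← hrs, if_neg hrM.2.1]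
      simp only [pvAnswer]
    · have hfind : S.find? (pvMatch f) = none :=
        List.find?_eq_none.mpr (fun x hx hpx => hM ⟨x, (hmemS x).mp hx, hpx⟩)
      have hr0 : r = [] := by
        rcases hA1 with h | ⟨⟨zone, hzone, hnz⟩, hm, hne⟩
        · exact hr.trans h
        · exact absurd ⟨r, (hmemL r).mpr ⟨⟨zone, hzone, hnz⟩, hne⟩, hm⟩ hM
      rw [hfind, if_pos hr0]
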